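-- pv_equiv track=rewrite | github.com/svregala/Minimax-Algorithm-with-Alpha-Beta-Pruning-to-play-Go-5x5 | my_player.py | captured_stones
-- ===== SOURCE A (Python) =====
-- N = 5  # size of given board(5x5)
--
-- def captured_stones(piece_type, currBoard):
--    captured = []
--    for i in range(N):
--       for j in range(N):
--          # check if there is a piece at this position
--          if currBoard[i][j] == piece_type:
--             if [i,j] not in captured:
--                liberty = find_liberty(i,j,currBoard)
--                # piece dies if it has no liberty
--                if(not liberty):
--                   captured.append([i,j])
--    return captured
--
-- def detect_neighbor(i,j,currBoard):
--    neighbors = []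
--    # Detect borders and add neighbor coordinates
--    if i > 0: neighbors.append((i-1, j))
--    if i < len(currBoard) - 1: neighbors.append((i+1, j))
--    if j > 0: neighbors.append((i, j-1))
--    if j < len(currBoard) - 1: neighbors.append((i, j+1))
--    return neighbors
--
-- def detect_neighbor_ally(i,j,currBoard):
--    group_allies = []
--    neighbors = detect_neighbor(i,j,currBoard)
--    # Iterate through neighbors
--    for piece in neighbors:
--       # Add allies to list if having the same color
--       if currBoard[piece[0]][piece[1]] == currBoard[i][j]:
--          group_allies.append(piece)
--    return group_allies
--
-- def ally_dfs(i,j,currBoard):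
--    stack = [[i,j]]
--    ally_members = []
--    while stack:
--       piece = stack.pop()
--       ally_members.append(piece)
--       neighbor_allies = detect_neighbor_ally(piece[0], piece[1], currBoard)
--       for ally in neighbor_allies:
--          if ally not in stack and ally not in ally_members:
--             stack.append(ally)
--    return ally_members
--
-- def find_liberty(x,y,currBoard):
--    liberty = 0
--    ally_members = ally_dfs(x,y,currBoard)
--    for member in ally_members:
--       neighbors = detect_neighbor(member[0],member[1],currBoard)
--       for piece in neighbors:
--           # If there is empty space around a piece, it has liberty
--          if currBoard[piece[0]][piece[1]] == 0:
--             liberty += 1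
--    # If none of the pieces in a allied group has an empty space, it has no liberty
--    return liberty
-- ===== SOURCE B (Python) =====
-- N = 5  # size of given board(5x5)
--
-- def captured_stones(piece_type, currBoard):
--    # One flood-fill pass: each connected same-color group is explored once (BFS/DFS
--    # with a global visited set); a group is dead iff no member ever sees an empty (0)
--    # neighbour.  Dead cells are collected in a set and emitted in row-major order.
--    n = len(currBoard)
--    visited = set()
--    dead = set()
--    for i in range(N):
--       for j in range(N):
--          if currBoard[i][j] != piece_type or (i, j) in visited:
--             continue
--          visited.add((i, j))
--          todo = [(i, j)]
--          group = [(i, j)]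
--          has_lib = False
--          while todo:
--             x, y = todo.pop()
--             for (p, q) in ((x - 1, y), (x + 1, y), (x, y - 1), (x, y + 1)):
--                if 0 <= p < n and 0 <= q < n:
--                   v = currBoard[p][q]
--                   if v == 0:
--                      has_lib = True
--                   if v == piece_type and (p, q) not in visited:
--                      visited.add((p, q))
--                      todo.append((p, q))
--                      group.append((p, q))
--          if not has_lib:
--             dead.update(group)
--    return [[i, j] for i in range(N) for j in range(N) if (i, j) in dead]
-- ===== Notes on version B (the rewrite author's own statement) =====
-- stated objective: alternative
-- what changed: A runs a fresh stack-DFS with O(group)-cost list membership for every scanned stone; B does one flood-fill pass with a global visited set (each connected group explored once, liberty tracked as a boolean during the fill) and emits the dead cells by a final row-major scan.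
import Mathlib
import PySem

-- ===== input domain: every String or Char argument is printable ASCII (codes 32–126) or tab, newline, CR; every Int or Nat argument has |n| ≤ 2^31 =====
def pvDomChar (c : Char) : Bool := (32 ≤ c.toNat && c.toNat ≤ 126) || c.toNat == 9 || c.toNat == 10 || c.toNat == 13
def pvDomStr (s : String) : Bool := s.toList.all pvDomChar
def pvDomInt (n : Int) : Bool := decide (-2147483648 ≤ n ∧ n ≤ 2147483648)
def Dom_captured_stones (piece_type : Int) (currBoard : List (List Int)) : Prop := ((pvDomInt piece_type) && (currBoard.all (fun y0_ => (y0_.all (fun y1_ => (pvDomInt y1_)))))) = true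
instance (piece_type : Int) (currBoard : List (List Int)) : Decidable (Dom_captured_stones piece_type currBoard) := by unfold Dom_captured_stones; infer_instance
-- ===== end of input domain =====

-- B replaces A's per-stone DFS (one full group search for every scanned stone, with
-- O(group)-cost list membership) by a single flood-fill pass with a global visited set:
-- each connected group is explored once and its no-liberty verdict is shared by all its
-- cells; the dead cells are then emitted in the same row-major order.

-- ===== PORT A =====
-- board access currBoard[i][j]; none exactly where Python raises IndexError
def pvCell (b : List (List Int)) (i j : Int) : Option Int :=
  (PySem.List.pyGet? b i).bind fun row => PySem.List.pyGet? row j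

def detect_neighbor (i j : Int) (b : List (List Int)) : List (Int × Int) :=
  (if 0 < i then [(i-1, j)] else []) ++
  (if i < (b.length : Int) - 1 then [(i+1, j)] else []) ++
  (if 0 < j then [(i, j-1)] else []) ++
  (if j < (b.length : Int) - 1 then [(i, j+1)] else [])

def detect_neighbor_ally (i j : Int) (b : List (List Int)) : List (Int × Int) :=
  (detect_neighbor i j b).filter (fun p => pvCell b p.1 p.2 == pvCell b i j)

abbrev pvInBox (n : Int) (c : Int × Int) : Prop := 0 ≤ c.1 ∧ c.1 < n ∧ 0 ≤ c.2 ∧ c.2 < n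

-- Python mixes the list [i,j] and tuples (i,j) as stack/ally_members elements; the only
-- effect of that mix is that the start cell can occur twice in ally_members, which
-- changes find_liberty's count but never its positivity, hence never the entry's result.
-- We model every cell uniformly as Int × Int.
-- The 'if hok' test is a totality guard for Lean's termination checker; it is proved
-- below (allyA_guard) to hold on every iteration reached from a well-formed start.
def ally_dfs_loop (b : List (List Int)) (stack members : List (Int × Int)) : List (Int × Int) :=
  if hs : stack = [] then members
  else
    let piece := stack.getLast hs
    let members' := members ++ [piece]
    let stack' := (detect_neighbor_ally piece.1 piece.2 b).foldl
        (fun st a => if a ∈ st ∨ a ∈ members' then st else st ++ [a]) stack.dropLast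
    if hok : stack'.Nodup ∧ members'.Nodup ∧
        (∀ c ∈ members', pvInBox (b.length : Int) c) ∧
        (∀ c ∈ stack', c ∉ members' ∧ pvInBox (b.length : Int) c) ∧
        members.length < b.length * b.length
    then ally_dfs_loop b stack' members'
    else members'
termination_by b.length * b.length - members.length
decreasing_by
  simp only [List.length_append, List.length_cons, List.length_nil] at *
  omega

def find_liberty (x y : Int) (b : List (List Int)) : Int :=
  let ally_members := ally_dfs_loop b [(x, y)] []
  ally_members.foldl (fun lib m =>
    (detect_neighbor m.1 m.2 b).foldl (fun l p =>
      if pvCell b p.1 p.2 == some 0 then l + 1 else l) lib) 0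

def captured_stones (piece_type : Int) (currBoard : List (List Int)) : List (List Int) :=
  (PySem.List.pyRange 0 5 1).foldl (fun cap i =>
    (PySem.List.pyRange 0 5 1).foldl (fun cap j =>
      if pvCell currBoard i j == some piece_type then
        if [i, j] ∈ cap then cap
        else if find_liberty i j currBoard == 0 then cap ++ [[i, j]] else cap
      else cap) cap) []

-- ===== PORT B =====
def pvNbrs (x y : Int) : List (Int × Int) := [(x-1, y), (x+1, y), (x, y-1), (x, y+1)]

-- state: (todo, group, visited, has_lib); one neighbour inspection of B's inner for-loop
def pv_upd (b : List (List Int)) (piece_type n : Int)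
    (st : List (Int × Int) × List (Int × Int) × PySem.Set (Int × Int) × Bool)
    (p : Int × Int) : List (Int × Int) × List (Int × Int) × PySem.Set (Int × Int) × Bool :=
  match st with
  | (todo, group, visited, haslib) =>
    if 0 ≤ p.1 ∧ p.1 < n ∧ 0 ≤ p.2 ∧ p.2 < n then
      let v := pvCell b p.1 p.2
      let haslib := haslib || (v == some 0)
      if v == some piece_type ∧ p ∉ visited then
        (todo ++ [p], group ++ [p], PySem.Set.add visited p, haslib)
      else (todo, group, visited, haslib)
    else (todo, group, visited, haslib)

-- The 'if hok' test is a totality guard (proved to hold on every reached iteration).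
def pv_bfs_loop (b : List (List Int)) (piece_type n : Int)
    (todo group : List (Int × Int)) (visited : PySem.Set (Int × Int)) (haslib : Bool) :
    List (Int × Int) × PySem.Set (Int × Int) × Bool :=
  if ht : todo = [] then (group, visited, haslib)
  else
    let c := todo.getLast ht
    let s' := (pvNbrs c.1 c.2).foldl (pv_upd b piece_type n) (todo.dropLast, group, visited, haslib)
    if hok : 2 * (n.toNat * n.toNat - s'.2.2.1.length) + s'.1.length <
             2 * (n.toNat * n.toNat - visited.length) + todo.length
    then pv_bfs_loop b piece_type n s'.1 s'.2.1 s'.2.2.1 s'.2.2.2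
    else (s'.2.1, s'.2.2.1, s'.2.2.2)
termination_by 2 * (n.toNat * n.toNat - visited.length) + todo.length
decreasing_by exact hok

def captured_stones_alt (piece_type : Int) (currBoard : List (List Int)) : List (List Int) :=
  let n : Int := currBoard.length
  let vd := (PySem.List.pyRange 0 5 1).foldl (fun vd i =>
    (PySem.List.pyRange 0 5 1).foldl (fun (vd : PySem.Set (Int × Int) × PySem.Set (Int × Int)) j =>
      if ¬ (pvCell currBoard i j == some piece_type) ∨ (i, j) ∈ vd.1 then vd
      else
        let r := pv_bfs_loop currBoard piece_type n [(i, j)] [(i, j)] (PySem.Set.add vd.1 (i, j)) false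
        if r.2.2 = false then (r.2.1, PySem.Set.update vd.2 r.1) else (r.2.1, vd.2)) vd)
    (PySem.Set.empty, PySem.Set.empty)
  (PySem.List.pyRange 0 5 1).flatMap (fun i =>
    ((PySem.List.pyRange 0 5 1).filter (fun j => (i, j) ∈ vd.2)).map (fun j => [i, j]))

-- ===== PRECONDITION & SPEC =====
-- Pre_ is the natural shape of the data: a board of height ≥ 5 (the fixed 5×5 scan)
-- all of whose rows are at least as long as the height (A's neighbour logic bounds BOTH
-- coordinates by len(currBoard)).  Outside this shape A's indexing raises IndexError,
-- except on accidental ragged boards whose short rows are never reached by the scan.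
def Pre_captured_stones (piece_type : Int) (currBoard : List (List Int)) : Prop :=
  5 ≤ (currBoard.length : Int) ∧ ∀ r ∈ currBoard, (currBoard.length : Int) ≤ (r.length : Int)
instance (piece_type : Int) (currBoard : List (List Int)) : Decidable (Pre_captured_stones piece_type currBoard) := by unfold Pre_captured_stones; infer_instance

def pvWitness_captured_stones : Int × List (List Int) :=
  (1, [[1, 2, 0, 0, 0], [2, 0, 0, 0, 0], [0, 0, 0, 0, 0], [0, 0, 0, 0, 0], [0, 0, 0, 0, 0]])

def Spec_captured_stones (piece_type : Int) (currBoard : List (List Int)) (out : List (List Int)) : Prop := out = captured_stones_alt piece_type currBoard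
instance (piece_type : Int) (currBoard : List (List Int)) (out : List (List Int)) : Decidable (Spec_captured_stones piece_type currBoard out) := by unfold Spec_captured_stones; infer_instance

-- ===== CLAIM (what is proved, stated in full; the proofs are below) =====
def Claim_equal_captured_stones : Prop := ∀ (piece_type : Int) (currBoard : List (List Int)), Dom_captured_stones piece_type currBoard → Pre_captured_stones piece_type currBoard → Spec_captured_stones piece_type currBoard (captured_stones piece_type currBoard)

-- ===== LEMMAS AND PROOFS =====

-- ---- proof-side notions: same-colour adjacency, reachability, liberty ----
def pvAdj (b : List (List Int)) (c d : Int × Int) : Prop := d ∈ detect_neighbor_ally c.1 c.2 b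

inductive pvReach (b : List (List Int)) (s : Int × Int) : (Int × Int) → Prop
  | refl : pvReach b s s
  | tail {c d : Int × Int} : pvReach b s c → pvAdj b c d → pvReach b s d

def pvLib (b : List (List Int)) (c : Int × Int) : Prop :=
  ∃ p ∈ detect_neighbor c.1 c.2 b, pvCell b p.1 p.2 = some 0

def pvDead (b : List (List Int)) (s : Int × Int) : Prop := ∀ c, pvReach b s c → ¬ pvLib b c

-- ---- basic facts about neighbours and adjacency ----
lemma mem_pvNbrs {p : Int × Int} {x y : Int} :
    p ∈ pvNbrs x y ↔ p = (x-1, y) ∨ p = (x+1, y) ∨ p = (x, y-1) ∨ p = (x, y+1) := by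
  simp [pvNbrs]

lemma nodup_pvNbrs (x y : Int) : (pvNbrs x y).Nodup := by
  simp [pvNbrs, Prod.ext_iff]; omega


lemma pv_mem_ite_single {P : Prop} [Decidable P] {x y : Int × Int} :
    (x ∈ if P then [y] else ([] : List (Int × Int))) ↔ P ∧ x = y := by
  split <;> simp_all

lemma mem_detect_neighbor {b : List (List Int)} {c p : Int × Int}
    (hc : pvInBox (b.length : Int) c) :
    p ∈ detect_neighbor c.1 c.2 b ↔ p ∈ pvNbrs c.1 c.2 ∧ pvInBox (b.length : Int) p := by
  obtain ⟨i, j⟩ := c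
  obtain ⟨h1, h2, h3, h4⟩ := hc
  simp only [detect_neighbor, List.mem_append, pv_mem_ite_single, mem_pvNbrs]
  constructor
  · rintro (((⟨h, rfl⟩ | ⟨h, rfl⟩) | ⟨h, rfl⟩) | ⟨h, rfl⟩) <;>
      exact ⟨by tauto, by refine ⟨?_, ?_, ?_, ?_⟩ <;> (try simp) <;> omega⟩
  · rintro ⟨(rfl | rfl | rfl | rfl), hbox⟩ <;> simp only [pvInBox] at hbox <;> (try simp at hbox)
    · exact Or.inl (Or.inl (Or.inl ⟨by omega, rfl⟩))
    · exact Or.inl (Or.inl (Or.inr ⟨by omega, rfl⟩))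
    · exact Or.inl (Or.inr ⟨by omega, rfl⟩)
    · exact Or.inr ⟨by omega, rfl⟩


lemma adj_iff {b : List (List Int)} {c d : Int × Int} (hc : pvInBox (b.length : Int) c) :
    pvAdj b c d ↔ d ∈ pvNbrs c.1 c.2 ∧ pvInBox (b.length : Int) d ∧
      pvCell b d.1 d.2 = pvCell b c.1 c.2 := by
  rw [pvAdj, detect_neighbor_ally, List.mem_filter, mem_detect_neighbor hc]
  simp only [beq_iff_eq]
  tauto


lemma adj_color {b : List (List Int)} {c d : Int × Int} (h : pvAdj b c d) :
    pvCell b d.1 d.2 = pvCell b c.1 c.2 := by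
  simp only [pvAdj, detect_neighbor_ally, List.mem_filter, beq_iff_eq] at h
  exact h.2

lemma adj_box {b : List (List Int)} {c d : Int × Int} (hc : pvInBox (b.length : Int) c)
    (h : pvAdj b c d) : pvInBox (b.length : Int) d := ((adj_iff hc).1 h).2.1


lemma adj_symm {b : List (List Int)} {c d : Int × Int} (hc : pvInBox (b.length : Int) c)
    (h : pvAdj b c d) : pvAdj b d c := by
  obtain ⟨hn, hd, hcol⟩ := (adj_iff hc).1 h
  refine (adj_iff hd).2 ⟨?_, hc, hcol.symm⟩
  rcases mem_pvNbrs.1 hn with rfl | rfl | rfl | rfl <;>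
    simp [mem_pvNbrs, Prod.ext_iff] <;> omega

-- ---- reachability facts ----
lemma reach_box {b : List (List Int)} {s c : Int × Int} (hs : pvInBox (b.length : Int) s)
    (h : pvReach b s c) : pvInBox (b.length : Int) c := by
  induction h with
  | refl => exact hs
  | tail _ h2 ih => exact adj_box ih h2

lemma reach_color {b : List (List Int)} {s c : Int × Int} (h : pvReach b s c) :
    pvCell b c.1 c.2 = pvCell b s.1 s.2 := by
  induction h with
  | refl => rfl
  | tail _ h2 ih => exact (adj_color h2).trans ih

lemma reach_trans {b : List (List Int)} {s c d : Int × Int} (h1 : pvReach b s c)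
    (h2 : pvReach b c d) : pvReach b s d := by
  induction h2 with
  | refl => exact h1
  | tail _ h2 ih => exact .tail ih h2

lemma reach_symm {b : List (List Int)} {s c : Int × Int} (hs : pvInBox (b.length : Int) s)
    (h : pvReach b s c) : pvReach b c s := by
  induction h with
  | refl => exact .refl
  | tail h1 h2 ih => exact reach_trans (.tail .refl (adj_symm (reach_box hs h1) h2)) ih

lemma reach_min {b : List (List Int)} {s c : Int × Int} {G : List (Int × Int)}
    (h : pvReach b s c) (hsG : s ∈ G)
    (hcl : ∀ x ∈ G, ∀ d, pvAdj b x d → d ∈ G) : c ∈ G := by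
  induction h with
  | refl => exact hsG
  | tail _ h2 ih => exact hcl _ ih _ h2

lemma dead_transport {b : List (List Int)} {s c : Int × Int} (hs : pvInBox (b.length : Int) s)
    (h : pvReach b s c) : (pvDead b s ↔ pvDead b c) :=
  ⟨fun hd x hx => hd x (reach_trans h hx),
   fun hd x hx => hd x (reach_trans (reach_symm hs h) hx)⟩

-- ---- a nodup list of in-box cells has at most n² elements ----

lemma pv_len_le {n : Int} {xs : List (Int × Int)} (hnd : xs.Nodup)
    (hbox : ∀ c ∈ xs, pvInBox n c) : xs.length ≤ n.toNat * n.toNat := by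
  have hsub : xs.toFinset ⊆ (Finset.Ico (0:Int) n) ×ˢ (Finset.Ico (0:Int) n) := by
    intro c hc
    obtain ⟨a1, a2, a3, a4⟩ := hbox c (List.mem_toFinset.1 hc)
    simp only [Finset.mem_product, Finset.mem_Ico]
    exact ⟨⟨a1, a2⟩, ⟨a3, a4⟩⟩
  have hcard := Finset.card_le_card hsub
  rw [List.toFinset_card_of_nodup hnd] at hcard
  simpa [Finset.card_product, Int.card_Ico] using hcard

-- ---- A side: the push fold of ally_dfs_loop ----
def pvPush (ms rest allies : List (Int × Int)) : List (Int × Int) :=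
  allies.foldl (fun st a => if a ∈ st ∨ a ∈ ms then st else st ++ [a]) rest


lemma pvPush_sub_rest {ms : List (Int × Int)} : ∀ (allies : List (Int × Int))
    {rest : List (Int × Int)}, ∀ x ∈ rest, x ∈ pvPush ms rest allies := by
  intro allies
  induction allies with
  | nil => intro rest x hx; exact hx
  | cons a l ih =>
    intro rest x hx
    show x ∈ pvPush ms (if a ∈ rest ∨ a ∈ ms then rest else rest ++ [a]) l
    apply ih
    split
    · exact hx
    · exact List.mem_append_left _ hx


lemma pvPush_mem {ms : List (Int × Int)} : ∀ (allies : List (Int × Int))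
    {rest : List (Int × Int)}, ∀ x ∈ pvPush ms rest allies, x ∈ rest ∨ x ∈ allies := by
  intro allies
  induction allies with
  | nil => intro rest x hx; exact Or.inl hx
  | cons a l ih =>
    intro rest x hx
    have hx' : x ∈ pvPush ms (if a ∈ rest ∨ a ∈ ms then rest else rest ++ [a]) l := hx
    rcases ih x hx' with h | h
    · split at h
      · exact Or.inl h
      · rcases List.mem_append.1 h with h | h
        · exact Or.inl h
        · simp at h; subst h; exact Or.inr (List.mem_cons_self ..)
    · exact Or.inr (List.mem_cons_of_mem _ h)


lemma pvPush_covers {ms : List (Int × Int)} : ∀ (allies : List (Int × Int))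
    {rest : List (Int × Int)}, ∀ a ∈ allies, a ∈ pvPush ms rest allies ∨ a ∈ ms := by
  intro allies
  induction allies with
  | nil => intro rest a ha; cases ha
  | cons a l ih =>
    intro rest a' ha'
    rcases List.mem_cons.1 ha' with rfl | h
    · by_cases hm : a' ∈ ms
      · exact Or.inr hm
      · left
        show a' ∈ pvPush ms (if a' ∈ rest ∨ a' ∈ ms then rest else rest ++ [a']) l
        apply pvPush_sub_rest
        by_cases hr : a' ∈ rest ∨ a' ∈ ms
        · simp only [if_pos hr]; exact hr.resolve_right hm
        · simp only [if_neg hr]; exact List.mem_append_right _ (by simp)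
    · exact ih a' h

lemma pvPush_nodup {ms : List (Int × Int)} : ∀ (allies : List (Int × Int))
    {rest : List (Int × Int)}, rest.Nodup → (∀ x ∈ rest, x ∉ ms) →
    (pvPush ms rest allies).Nodup ∧ ∀ x ∈ pvPush ms rest allies, x ∉ ms := by
  intro allies
  induction allies with
  | nil => intro rest h1 h2; exact ⟨h1, h2⟩
  | cons a l ih =>
    intro rest h1 h2
    show (pvPush ms (if a ∈ rest ∨ a ∈ ms then rest else rest ++ [a]) l).Nodup ∧
      ∀ x ∈ pvPush ms (if a ∈ rest ∨ a ∈ ms then rest else rest ++ [a]) l, x ∉ ms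
    by_cases hc : a ∈ rest ∨ a ∈ ms
    · rw [if_pos hc]; exact ih h1 h2
    · rw [if_neg hc]
      push_neg at hc
      refine ih ?_ ?_
      · simp [List.nodup_append, h1]
        intro a1 b hm heq
        exact hc.1 (heq ▸ hm)
      · intro x hx
        rcases List.mem_append.1 hx with h | h
        · exact h2 x h
        · simp at h; subst h; exact hc.2

-- ---- A side: characterisation of ally_dfs_loop ----
lemma allyA_main (b : List (List Int)) :
    ∀ (stack members : List (Int × Int)),
    stack.Nodup → members.Nodup →
    (∀ c ∈ members, pvInBox (b.length : Int) c) →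
    (∀ c ∈ stack, c ∉ members ∧ pvInBox (b.length : Int) c) →
    (∀ x ∈ stack ++ members, x ∈ ally_dfs_loop b stack members) ∧
    (∀ x ∈ ally_dfs_loop b stack members, x ∈ members ∨ ∃ t ∈ stack, pvReach b t x) ∧
    ((∀ c ∈ members, ∀ d, pvAdj b c d → d ∈ stack ++ members) →
      ∀ x ∈ ally_dfs_loop b stack members, ∀ d, pvAdj b x d →
        d ∈ ally_dfs_loop b stack members) := by
  have key : ∀ (k : Nat) (stack members : List (Int × Int)),
      b.length * b.length + 1 - members.length ≤ k →
      stack.Nodup → members.Nodup →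
      (∀ c ∈ members, pvInBox (b.length : Int) c) →
      (∀ c ∈ stack, c ∉ members ∧ pvInBox (b.length : Int) c) →
      (∀ x ∈ stack ++ members, x ∈ ally_dfs_loop b stack members) ∧
      (∀ x ∈ ally_dfs_loop b stack members, x ∈ members ∨ ∃ t ∈ stack, pvReach b t x) ∧
      ((∀ c ∈ members, ∀ d, pvAdj b c d → d ∈ stack ++ members) →
        ∀ x ∈ ally_dfs_loop b stack members, ∀ d, pvAdj b x d →
          d ∈ ally_dfs_loop b stack members) := by
    intro k
    induction k with
    | zero =>
      intro stack members hk _ h2 h3 _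
      have h := pv_len_le h2 h3
      rw [Int.toNat_natCast] at h
      exact absurd h (by omega)
    | succ k ihk =>
      intro stack members hk h1 h2 h3 h4
      rw [ally_dfs_loop]
      by_cases hs : stack = []
      · subst hs
        simp only [dif_pos]
        refine ⟨by simp, fun x hx => Or.inl hx, fun H x hx d hd => by simpa using H x hx d hd⟩
      · rw [dif_neg hs]
        simp only []
        have hsplit : stack.dropLast ++ [stack.getLast hs] = stack :=
          List.dropLast_concat_getLast hs
        have hpmem : stack.getLast hs ∈ stack := List.getLast_mem hs
        obtain ⟨hpnm, hpbox⟩ := h4 _ hpmem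
        have hrestnd : stack.dropLast.Nodup := (List.dropLast_sublist stack).nodup h1
        have hpnr : stack.getLast hs ∉ stack.dropLast := by
          rw [← hsplit] at h1
          have hdis := (List.nodup_append.1 h1).2.2
          intro hmem
          exact hdis _ hmem _ (by simp) rfl
        have hrw : ((detect_neighbor_ally (stack.getLast hs).1 (stack.getLast hs).2 b).foldl
            (fun st a => if a ∈ st ∨ a ∈ members ++ [stack.getLast hs] then st else st ++ [a])
            stack.dropLast) = pvPush (members ++ [stack.getLast hs]) stack.dropLast
            (detect_neighbor_ally (stack.getLast hs).1 (stack.getLast hs).2 b) := rfl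
        rw [hrw]
        set piece := stack.getLast hs with hpiece
        set allies := detect_neighbor_ally piece.1 piece.2 b with hallies
        set members' := members ++ [piece] with hmem'
        set stack' := pvPush members' stack.dropLast allies with hstack'
        have hrestfresh : ∀ x ∈ stack.dropLast, x ∉ members' := by
          intro x hx
          have hxs : x ∈ stack := by rw [← hsplit]; exact List.mem_append_left _ hx
          have hxne : x ≠ piece := fun he => hpnr (he ▸ hx)
          simp only [hmem', List.mem_append, List.mem_singleton]
          rintro (h | h)
          · exact (h4 x hxs).1 h
          · exact hxne h
        have hpushnd := pvPush_nodup (ms := members') allies hrestnd hrestfresh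
        have hmem'nd : members'.Nodup := by
          rw [hmem', List.nodup_append]
          refine ⟨h2, by simp, ?_⟩
          intro a ha bb hb
          simp at hb; subst hb
          exact fun he => hpnm (he ▸ ha)
        have hmem'box : ∀ c ∈ members', pvInBox (b.length : Int) c := by
          intro c hc
          rcases List.mem_append.1 hc with h | h
          · exact h3 c h
          · simp at h; subst h; exact hpbox
        have hstk' : ∀ c ∈ stack', c ∉ members' ∧ pvInBox (b.length : Int) c := by
          intro c hc
          refine ⟨hpushnd.2 c hc, ?_⟩
          rcases pvPush_mem allies c hc with h | h
          · exact (h4 c (by rw [← hsplit]; exact List.mem_append_left _ h)).2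
          · exact adj_box hpbox h
        have hlen : members.length < b.length * b.length := by
          have h := pv_len_le hmem'nd hmem'box
          rw [Int.toNat_natCast] at h
          have hl : members'.length = members.length + 1 := by simp [hmem']
          omega
        have hok : stack'.Nodup ∧ members'.Nodup ∧
            (∀ c ∈ members', pvInBox (b.length : Int) c) ∧
            (∀ c ∈ stack', c ∉ members' ∧ pvInBox (b.length : Int) c) ∧
            members.length < b.length * b.length :=
          ⟨hpushnd.1, hmem'nd, hmem'box, hstk', hlen⟩
        rw [dif_pos hok]
        have hkm : b.length * b.length + 1 - members'.length ≤ k := by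
          simp [hmem']; omega
        obtain ⟨IH1, IH2, IH3⟩ := ihk stack' members' hkm hpushnd.1 hmem'nd hmem'box hstk'
        refine ⟨?_, ?_, ?_⟩
        · -- everything in stack ++ members ends up in the result
          intro x hx
          rcases List.mem_append.1 hx with h | h
          · rcases (by rw [← hsplit] at h; exact List.mem_append.1 h) with h | h
            · exact IH1 x (List.mem_append_left _ (pvPush_sub_rest allies x h))
            · simp at h
              exact IH1 x (List.mem_append_right _ (by simp [hmem', h]))
          · exact IH1 x (List.mem_append_right _ (by simp [hmem', h]))
        · -- everything in the result is reachable from the stack (or old)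
          intro x hx
          rcases IH2 x hx with h | h
          · rcases List.mem_append.1 h with h | h
            · exact Or.inl h
            · simp at h; subst h; exact Or.inr ⟨piece, hpmem, .refl⟩
          · obtain ⟨t, ht, hr⟩ := h
            rcases pvPush_mem allies t ht with h | h
            · exact Or.inr ⟨t, by rw [← hsplit]; exact List.mem_append_left _ h, hr⟩
            · exact Or.inr ⟨piece, hpmem, reach_trans (.tail .refl h) hr⟩
        · -- closedness propagates
          intro H
          apply IH3
          intro c hc d hd
          rcases List.mem_append.1 hc with h | h
          · rcases List.mem_append.1 (H c h d hd) with h' | h'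
            · rcases (by rw [← hsplit] at h'; exact List.mem_append.1 h') with h' | h'
              · exact List.mem_append_left _ (pvPush_sub_rest allies d h')
              · simp at h'
                exact List.mem_append_right _ (by simp [hmem', h'])
            · exact List.mem_append_right _ (by simp [hmem', h'])
          · simp at h; subst h
            rcases pvPush_covers allies d hd with h' | h'
            · exact List.mem_append_left _ h'
            · exact List.mem_append_right _ h'
  intro stack members h1 h2 h3 h4
  exact key (b.length * b.length + 1 - members.length) stack members le_rfl h1 h2 h3 h4

lemma allyA_char {b : List (List Int)} {s : Int × Int} (hs : pvInBox (b.length : Int) s) :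
    ∀ c, c ∈ ally_dfs_loop b [s] [] ↔ pvReach b s c := by
  obtain ⟨hin, hsub, hcl⟩ := allyA_main b [s] [] (by simp) (by simp) (by simp)
    (by intro c hc; simp at hc; subst hc; exact ⟨by simp, hs⟩)
  intro c
  constructor
  · intro hc
    rcases hsub c hc with h | h
    · cases h
    · obtain ⟨t, ht, hr⟩ := h
      simp at ht; subst ht
      exact hr
  · intro hr
    exact reach_min hr (hin s (by simp)) (hcl (by simp))

-- ---- A side: find_liberty = 0 iff the whole group is liberty-free ----

lemma pv_sum_cast_zero {α : Type} (l : List α) (f : α → Nat) :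
    ((l.map (fun x => (f x : Int))).sum = 0 ↔ ∀ x ∈ l, f x = 0) := by
  induction l with
  | nil => simp
  | cons k l ih =>
    have hs : 0 ≤ (l.map (fun x => (f x : Int))).sum := by
      apply List.sum_nonneg
      intro x hx
      simp only [List.mem_map] at hx
      obtain ⟨m, _, rfl⟩ := hx
      exact Int.natCast_nonneg (f m)
    rw [List.map_cons, List.sum_cons]
    constructor
    · intro h
      have hk : (f k : Int) = 0 := by omega
      have hl : (l.map (fun x => (f x : Int))).sum = 0 := by omega
      intro m hm
      rcases List.mem_cons.1 hm with rfl | hm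
      · exact_mod_cast hk
      · exact ih.1 hl m hm
    · intro h
      have hk : (f k : Int) = 0 := by exact_mod_cast h k (List.mem_cons_self ..)
      rw [hk, zero_add]
      exact ih.2 (fun m hm => h m (List.mem_cons_of_mem _ hm))

lemma find_liberty_zero_iff {b : List (List Int)} {s : Int × Int}
    (hs : pvInBox (b.length : Int) s) :
    (find_liberty s.1 s.2 b = 0) ↔ pvDead b s := by
  have hM := allyA_char hs
  simp only [find_liberty, PySem.List.foldl_count_if, PySem.List.foldl_add, zero_add]
  rw [pv_sum_cast_zero]
  constructor
  · intro h c hr hlib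
    obtain ⟨p, hp, hp0⟩ := hlib
    have hc : c ∈ ally_dfs_loop b [(s.1, s.2)] [] := (hM c).2 hr
    exact absurd (by simp [hp0] : (pvCell b p.1 p.2 == some 0) = true)
      (List.countP_eq_zero.1 (h c hc) p hp)
  · intro h m hm
    apply List.countP_eq_zero.2
    intro p hp hp0
    exact h m ((hM m).1 hm) ⟨p, hp, by simpa using hp0⟩

-- ---- B side: one BFS step ----
def pvNewB (b : List (List Int)) (pt n : Int) (vs ps : List (Int × Int)) : List (Int × Int) :=
  ps.filter (fun p => decide (0 ≤ p.1 ∧ p.1 < n ∧ 0 ≤ p.2 ∧ p.2 < n) &&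
    (pvCell b p.1 p.2 == some pt) && !(decide (p ∈ vs)))

def pvZB (b : List (List Int)) (n : Int) (ps : List (Int × Int)) : Bool :=
  ps.any (fun p => decide (0 ≤ p.1 ∧ p.1 < n ∧ 0 ≤ p.2 ∧ p.2 < n) &&
    (pvCell b p.1 p.2 == some 0))

lemma pvNewB_insensitive (b : List (List Int)) (pt n : Int) {p : Int × Int}
    {ps : List (Int × Int)} (vs : List (Int × Int)) (hp : p ∉ ps) :
    pvNewB b pt n (vs ++ [p]) ps = pvNewB b pt n vs ps := by
  apply List.filter_congr
  intro x hx
  have hxp : x ≠ p := fun he => hp (he ▸ hx)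
  simp [List.mem_append, hxp]

lemma stepFold (b : List (List Int)) (pt n : Int) :
    ∀ (ps : List (Int × Int)), ps.Nodup →
    ∀ (t g : List (Int × Int)) (vs : PySem.Set (Int × Int)) (h : Bool),
    ps.foldl (pv_upd b pt n) (t, g, vs, h) =
      (t ++ pvNewB b pt n vs ps, g ++ pvNewB b pt n vs ps,
       vs ++ pvNewB b pt n vs ps, h || pvZB b n ps) := by
  intro ps
  induction ps with
  | nil => intro _ t g vs h; simp [pvNewB, pvZB]
  | cons p ps ih =>
    intro hnd t g vs h
    have hpn : p ∉ ps := (List.nodup_cons.1 hnd).1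
    have hnd' : ps.Nodup := (List.nodup_cons.1 hnd).2
    rw [List.foldl_cons]
    by_cases hbox : (0 ≤ p.1 ∧ p.1 < n ∧ 0 ≤ p.2 ∧ p.2 < n)
    · by_cases hpush : ((pvCell b p.1 p.2 == some pt) = true ∧ p ∉ vs)
      · have hupd : pv_upd b pt n (t, g, vs, h) p =
            (t ++ [p], g ++ [p], vs ++ [p], h || (pvCell b p.1 p.2 == some 0)) := by
          simp only [pv_upd]
          rw [if_pos hbox, if_pos hpush, PySem.Set.add_of_not_mem hpush.2]
        rw [hupd, ih hnd', pvNewB_insensitive b pt n vs hpn]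
        have hcond : pvNewB b pt n vs (p :: ps) = p :: pvNewB b pt n vs ps := by
          simp [pvNewB, List.filter_cons, hbox, hpush.1, hpush.2]
        have hz : pvZB b n (p :: ps) =
            ((decide (0 ≤ p.1 ∧ p.1 < n ∧ 0 ≤ p.2 ∧ p.2 < n) &&
              (pvCell b p.1 p.2 == some 0)) || pvZB b n ps) := by
          simp [pvZB]
        rw [hcond, hz]
        simp [hbox, Bool.or_assoc]
      · have hupd : pv_upd b pt n (t, g, vs, h) p =
            (t, g, vs, h || (pvCell b p.1 p.2 == some 0)) := by
          simp only [pv_upd]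
          rw [if_pos hbox, if_neg hpush]
        rw [hupd, ih hnd']
        have hcond : pvNewB b pt n vs (p :: ps) = pvNewB b pt n vs ps := by
          rcases not_and_or.1 hpush with hb | hm
          · simp [pvNewB, List.filter_cons, Bool.not_eq_true _ ▸ hb,
              show (pvCell b p.1 p.2 == some pt) = false from Bool.not_eq_true _ ▸ (by simpa using hb)]
          · have hm' : p ∈ vs := not_not.1 hm
            simp [pvNewB, List.filter_cons, hm']
        have hz : pvZB b n (p :: ps) =
            ((decide (0 ≤ p.1 ∧ p.1 < n ∧ 0 ≤ p.2 ∧ p.2 < n) &&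
              (pvCell b p.1 p.2 == some 0)) || pvZB b n ps) := by
          simp [pvZB]
        rw [hcond, hz]
        simp [hbox, Bool.or_assoc]
    · have hupd : pv_upd b pt n (t, g, vs, h) p = (t, g, vs, h) := by
        simp only [pv_upd]
        rw [if_neg hbox]
      rw [hupd, ih hnd']
      have hcond : pvNewB b pt n vs (p :: ps) = pvNewB b pt n vs ps := by
        simp [pvNewB, List.filter_cons, hbox]
      have hz : pvZB b n (p :: ps) = pvZB b n ps := by
        simp [pvZB, hbox]
      rw [hcond, hz]

-- ---- B side: characterisation of pv_bfs_loop ----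
lemma bfsB_base (b : List (List Int)) (pt : Int) (s : Int × Int)
    (hsbox : pvInBox (b.length : Int) s)
    (group visited : List (Int × Int)) (haslib : Bool) (vis0 : List (Int × Int))
    (hg : s ∈ group) (hgr : ∀ c ∈ group, pvReach b s c)
    (hvis : ∀ c, c ∈ visited ↔ (c ∈ vis0 ∨ c ∈ group))
    (hcl : ∀ c ∈ group, ∀ d, pvAdj b c d → d ∈ group)
    (hlib : haslib = true ↔ ∃ c ∈ group, pvLib b c) :
    (∀ c, c ∈ group ↔ pvReach b s c) ∧
    (∀ c, c ∈ visited ↔ (c ∈ vis0 ∨ pvReach b s c)) ∧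
    (haslib = true ↔ ∃ c, pvReach b s c ∧ pvLib b c) := by
  have hchar : ∀ c, c ∈ group ↔ pvReach b s c := by
    intro c
    exact ⟨fun hc => hgr c hc, fun hr => reach_min hr hg hcl⟩
  refine ⟨hchar, ?_, ?_⟩
  · intro c
    rw [hvis c, hchar c]
  · rw [hlib]
    constructor
    · rintro ⟨c, hc, hl⟩; exact ⟨c, (hchar c).1 hc, hl⟩
    · rintro ⟨c, hr, hl⟩; exact ⟨c, (hchar c).2 hr, hl⟩

lemma bfsB_main (b : List (List Int)) (pt : Int) (s : Int × Int)
    (hsbox : pvInBox (b.length : Int) s) (hscell : pvCell b s.1 s.2 = some pt) :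
    ∀ (k : Nat) (todo group : List (Int × Int)) (visited : PySem.Set (Int × Int))
      (haslib : Bool) (vis0 : List (Int × Int)),
    2 * (b.length * b.length - visited.length) + todo.length ≤ k →
    todo.Nodup → visited.Nodup → (∀ c ∈ visited, pvInBox (b.length : Int) c) →
    (∀ c ∈ todo, c ∈ visited) →
    s ∈ group → (∀ c ∈ group, pvReach b s c) →
    (∀ c, c ∈ visited ↔ (c ∈ vis0 ∨ c ∈ group)) →
    (∀ c ∈ vis0, ¬ pvReach b s c) →
    (∀ c ∈ todo, c ∈ group) →
    (∀ c ∈ group, c ∉ todo → ∀ d, pvAdj b c d → d ∈ group) →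
    (haslib = true ↔ ∃ c ∈ group, c ∉ todo ∧ pvLib b c) →
    (∀ c, c ∈ (pv_bfs_loop b pt (b.length : Int) todo group visited haslib).1 ↔ pvReach b s c) ∧
    (∀ c, c ∈ (pv_bfs_loop b pt (b.length : Int) todo group visited haslib).2.1 ↔
      (c ∈ vis0 ∨ pvReach b s c)) ∧
    ((pv_bfs_loop b pt (b.length : Int) todo group visited haslib).2.2 = true ↔
      ∃ c, pvReach b s c ∧ pvLib b c) ∧
    (pv_bfs_loop b pt (b.length : Int) todo group visited haslib).2.1.Nodup ∧
    (∀ c ∈ (pv_bfs_loop b pt (b.length : Int) todo group visited haslib).2.1,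
      pvInBox (b.length : Int) c) := by
  intro k
  induction k with
  | zero =>
    intro todo group visited haslib vis0 hmeas h1 h2 h3 h4 hg hgr hvis hV0 htg h5 h6
    have ht : todo = [] := by
      cases todo with
      | nil => rfl
      | cons a l => simp at hmeas
    subst ht
    rw [pv_bfs_loop, dif_pos rfl]
    obtain ⟨c1, c2, c3⟩ := bfsB_base b pt s hsbox group visited haslib vis0 hg hgr hvis
      (fun c hc d hd => h5 c hc (by simp) d hd) (by rw [h6]; simp)
    exact ⟨c1, c2, c3, h2, h3⟩
  | succ k ihk =>
    intro todo group visited haslib vis0 hmeas h1 h2 h3 h4 hg hgr hvis hV0 htg h5 h6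
    by_cases ht : todo = []
    · subst ht
      rw [pv_bfs_loop, dif_pos rfl]
      obtain ⟨c1, c2, c3⟩ := bfsB_base b pt s hsbox group visited haslib vis0 hg hgr hvis
        (fun c hc d hd => h5 c hc (by simp) d hd) (by rw [h6]; simp)
      exact ⟨c1, c2, c3, h2, h3⟩
    · rw [pv_bfs_loop, dif_neg ht]
      simp only []
      have hsplit : todo.dropLast ++ [todo.getLast ht] = todo :=
        List.dropLast_concat_getLast ht
      set c := todo.getLast ht with hcdef
      have hcmem : c ∈ todo := List.getLast_mem ht
      have hcvis : c ∈ visited := h4 c hcmem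
      have hcgrp : c ∈ group := htg c hcmem
      have hcreach : pvReach b s c := hgr c hcgrp
      have hcbox : pvInBox (b.length : Int) c := reach_box hsbox hcreach
      have hccell : pvCell b c.1 c.2 = some pt := (reach_color hcreach).trans hscell
      have hcnr : c ∉ todo.dropLast := by
        rw [← hsplit] at h1
        have hdis := (List.nodup_append.1 h1).2.2
        intro hmem
        exact hdis _ hmem _ (by simp) rfl
      rw [stepFold b pt (b.length : Int) _ (nodup_pvNbrs c.1 c.2) todo.dropLast group visited haslib]
      set NEW := pvNewB b pt (b.length : Int) visited (pvNbrs c.1 c.2) with hNEWdef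
      set Z := pvZB b (b.length : Int) (pvNbrs c.1 c.2) with hZdef
      simp only [Int.toNat_natCast]
      have hNEWmem : ∀ p, p ∈ NEW ↔ (p ∈ pvNbrs c.1 c.2 ∧ pvInBox (b.length : Int) p ∧
          pvCell b p.1 p.2 = some pt ∧ p ∉ visited) := by
        intro p
        simp [hNEWdef, pvNewB, List.mem_filter, beq_iff_eq, pvInBox]
        tauto
      have hNEWadj : ∀ p ∈ NEW, pvAdj b c p := by
        intro p hp
        obtain ⟨hn, hb', hc', _⟩ := (hNEWmem p).1 hp
        exact (adj_iff hcbox).2 ⟨hn, hb', hc'.trans hccell.symm⟩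
      have hNEWreach : ∀ p ∈ NEW, pvReach b s p := fun p hp => .tail hcreach (hNEWadj p hp)
      have hNEWnd : NEW.Nodup := (List.Nodup.filter _ (nodup_pvNbrs c.1 c.2))
      have hNEWfresh : ∀ p ∈ NEW, p ∉ visited := fun p hp => ((hNEWmem p).1 hp).2.2.2
      have hNEWbox : ∀ p ∈ NEW, pvInBox (b.length : Int) p := fun p hp => ((hNEWmem p).1 hp).2.1
      have hvis'nd : (visited ++ NEW).Nodup := by
        rw [List.nodup_append]
        exact ⟨h2, hNEWnd, fun a ha bb hb he => hNEWfresh bb hb (he ▸ ha)⟩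
      have hvis'box : ∀ p ∈ visited ++ NEW, pvInBox (b.length : Int) p := by
        intro p hp
        rcases List.mem_append.1 hp with h | h
        · exact h3 p h
        · exact hNEWbox p h
      have hlenvis : (visited ++ NEW).length ≤ b.length * b.length := by
        have h := pv_len_le hvis'nd hvis'box
        rwa [Int.toNat_natCast] at h
      have htlen : 0 < todo.length := List.length_pos_iff.2 ht
      have hldrop : todo.dropLast.length = todo.length - 1 := by simp
      have hok : 2 * (b.length * b.length - (visited ++ NEW).length) +
          (todo.dropLast ++ NEW).length <
          2 * (b.length * b.length - visited.length) + todo.length := by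
        simp only [List.length_append] at *
        omega
      rw [dif_pos hok]
      have hZiff : Z = true ↔ pvLib b c := by
        simp [hZdef, pvZB, List.any_eq_true, beq_iff_eq, pvLib, mem_detect_neighbor hcbox, pvInBox]
        tauto
      have hcnotodo' : c ∉ todo.dropLast ++ NEW := by
        intro hmem
        rcases List.mem_append.1 hmem with h | h
        · exact hcnr h
        · exact hNEWfresh c h hcvis
      apply ihk
      · simp only [List.length_append] at *
        omega
      · rw [List.nodup_append]
        refine ⟨(List.dropLast_sublist todo).nodup h1, hNEWnd, ?_⟩
        intro a ha bb hb he
        subst he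
        exact hNEWfresh a hb (h4 a (by rw [← hsplit]; exact List.mem_append_left _ ha))
      · exact hvis'nd
      · exact hvis'box
      · intro x hx
        rcases List.mem_append.1 hx with h | h
        · exact List.mem_append_left _ (h4 x (by rw [← hsplit]; exact List.mem_append_left _ h))
        · exact List.mem_append_right _ h
      · exact List.mem_append_left _ hg
      · intro x hx
        rcases List.mem_append.1 hx with h | h
        · exact hgr x h
        · exact hNEWreach x h
      · intro x
        rw [List.mem_append, List.mem_append, hvis x]
        tauto
      · exact hV0
      · intro x hx
        rcases List.mem_append.1 hx with h | h
        · exact List.mem_append_left _ (htg x (by rw [← hsplit]; exact List.mem_append_left _ h))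
        · exact List.mem_append_right _ h
      · intro x hx hxt d hd
        rcases List.mem_append.1 hx with hxg | hxn
        · by_cases hxc : x = c
          · subst hxc
            obtain ⟨hdn, hdb, hdc⟩ := (adj_iff hcbox).1 hd
            by_cases hdv : d ∈ visited
            · rcases (hvis d).1 hdv with h | h
              · exact absurd (.tail (hgr c hxg) hd) (hV0 d h)
              · exact List.mem_append_left _ h
            · exact List.mem_append_right _
                ((hNEWmem d).2 ⟨hdn, hdb, hdc.trans hccell, hdv⟩)
          · have hxt' : x ∉ todo := by
              rw [← hsplit]
              intro hmem
              rcases List.mem_append.1 hmem with h | h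
              · exact (fun hh => hh h) (fun hh => hxt (List.mem_append_left _ hh))
              · simp at h; exact hxc h
            exact List.mem_append_left _ (h5 x hxg hxt' d hd)
        · exact absurd (List.mem_append_right _ hxn) hxt
      · constructor
        · intro hor
          rcases Bool.or_eq_true_iff.1 hor with h | h
          · obtain ⟨x, hxg, hxt, hxl⟩ := h6.1 h
            refine ⟨x, List.mem_append_left _ hxg, ?_, hxl⟩
            intro hmem
            rcases List.mem_append.1 hmem with hh | hh
            · exact hxt (by rw [← hsplit]; exact List.mem_append_left _ hh)
            · exact hNEWfresh x hh ((hvis x).2 (Or.inr hxg))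
          · exact ⟨c, List.mem_append_left _ hcgrp, hcnotodo', hZiff.1 h⟩
        · rintro ⟨x, hxg, hxt, hxl⟩
          rcases List.mem_append.1 hxg with h | h
          · by_cases hxc : x = c
            · subst hxc
              exact Bool.or_eq_true_iff.2 (Or.inr (hZiff.2 hxl))
            · have hxt' : x ∉ todo := by
                rw [← hsplit]
                intro hmem
                rcases List.mem_append.1 hmem with hh | hh
                · exact hxt (List.mem_append_left _ hh)
                · simp at hh; exact hxc hh
              exact Bool.or_eq_true_iff.2 (Or.inl (h6.2 ⟨x, h, hxt', hxl⟩))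
          · exact absurd (List.mem_append_right _ h) hxt

lemma bfsB_seed (b : List (List Int)) (pt : Int) (s : Int × Int)
    (hsbox : pvInBox (b.length : Int) s) (hscell : pvCell b s.1 s.2 = some pt)
    (vis : PySem.Set (Int × Int)) (hnd : vis.Nodup)
    (hbox : ∀ c ∈ vis, pvInBox (b.length : Int) c) (hsv : s ∉ vis)
    (hV0 : ∀ c ∈ vis, ¬ pvReach b s c) :
    (∀ c, c ∈ (pv_bfs_loop b pt (b.length : Int) [s] [s] (PySem.Set.add vis s) false).1 ↔ pvReach b s c) ∧
    (∀ c, c ∈ (pv_bfs_loop b pt (b.length : Int) [s] [s] (PySem.Set.add vis s) false).2.1 ↔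
      (c ∈ vis ∨ pvReach b s c)) ∧
    ((pv_bfs_loop b pt (b.length : Int) [s] [s] (PySem.Set.add vis s) false).2.2 = true ↔
      ∃ c, pvReach b s c ∧ pvLib b c) ∧
    (pv_bfs_loop b pt (b.length : Int) [s] [s] (PySem.Set.add vis s) false).2.1.Nodup ∧
    (∀ c ∈ (pv_bfs_loop b pt (b.length : Int) [s] [s] (PySem.Set.add vis s) false).2.1,
      pvInBox (b.length : Int) c) := by
  rw [PySem.Set.add_of_not_mem hsv]
  have hnd' : (vis ++ [s]).Nodup := by
    rw [List.nodup_append]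
    refine ⟨hnd, by simp, ?_⟩
    intro a ha bb hb he
    subst he
    simp at hb; subst hb
    exact hsv ha
  apply bfsB_main b pt s hsbox hscell
    (2 * (b.length * b.length - (vis ++ [s]).length) + 1) [s] [s] (vis ++ [s]) false vis
  · simp
  · simp
  · exact hnd'
  · intro c hc
    rcases List.mem_append.1 hc with h | h
    · exact hbox c h
    · simp at h; subst h; exact hsbox
  · intro c hc; simp at hc; subst hc; simp
  · simp
  · intro c hc; simp at hc; subst hc; exact .refl
  · intro c; rw [List.mem_append]
  · exact hV0
  · intro c hc; exact hc
  · intro c hc hct d hd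
    simp at hc; subst hc
    exact absurd (by simp : c ∈ [c]) (by simpa using hct)
  · constructor
    · intro h; cases h
    · rintro ⟨c, hc, hct, _⟩
      simp at hc; subst hc
      exact absurd (by simp : c ∈ [c]) hct

-- ---- the row-major scan list ----
def pvScan : List (Int × Int) :=
  (PySem.List.pyRange 0 5 1).flatMap (fun i => (PySem.List.pyRange 0 5 1).map (fun j => (i, j)))


lemma mem_pvScan {c : Int × Int} : c ∈ pvScan ↔ 0 ≤ c.1 ∧ c.1 < 5 ∧ 0 ≤ c.2 ∧ c.2 < 5 := by
  simp only [pvScan, List.mem_flatMap, List.mem_map, PySem.List.mem_pyRange_one]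
  constructor
  · rintro ⟨i, hi, j, hj, rfl⟩
    exact ⟨hi.1, hi.2, hj.1, hj.2⟩
  · rintro ⟨h1, h2, h3, h4⟩
    exact ⟨c.1, ⟨h1, h2⟩, c.2, ⟨h3, h4⟩, rfl⟩

lemma nodup_pvScan : pvScan.Nodup := by decide

-- ---- A side: the outer scan as a filterMap ----
def pvFA (b : List (List Int)) (pt : Int) (c : Int × Int) : Option (List Int) :=
  if (pvCell b c.1 c.2 == some pt) && (find_liberty c.1 c.2 b == 0) then some [c.1, c.2] else none

lemma A_fold (b : List (List Int)) (pt : Int) :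
    ∀ (L P : List (Int × Int)), L.Nodup → (∀ p ∈ L, p ∉ P) →
    L.foldl (fun cap c =>
      if pvCell b c.1 c.2 == some pt then
        if [c.1, c.2] ∈ cap then cap
        else if find_liberty c.1 c.2 b == 0 then cap ++ [[c.1, c.2]] else cap
      else cap) (P.filterMap (pvFA b pt)) = (P ++ L).filterMap (pvFA b pt) := by
  intro L
  induction L with
  | nil => intro P _ _; simp
  | cons c L ih =>
    intro P hnd hfresh
    have hcP : c ∉ P := hfresh c (by simp)
    have hnotin : [c.1, c.2] ∉ P.filterMap (pvFA b pt) := by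
      intro hmem
      obtain ⟨p, hp, hfp⟩ := List.mem_filterMap.1 hmem
      have hpc : p = c := by
        simp only [pvFA] at hfp
        split at hfp
        · have := Option.some.inj hfp
          have h1 : p.1 = c.1 := by
            have := List.cons.inj this
            exact this.1
          have h2 : p.2 = c.2 := by
            have := List.cons.inj this
            have := List.cons.inj this.2
            exact this.1
          exact Prod.ext h1 h2
        · cases hfp
      exact hcP (hpc ▸ hp)
    simp only [List.foldl_cons]
    have hstep : (if pvCell b c.1 c.2 == some pt then
        if [c.1, c.2] ∈ P.filterMap (pvFA b pt) then P.filterMap (pvFA b pt)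
        else if find_liberty c.1 c.2 b == 0 then P.filterMap (pvFA b pt) ++ [[c.1, c.2]]
        else P.filterMap (pvFA b pt)
      else P.filterMap (pvFA b pt)) = (P ++ [c]).filterMap (pvFA b pt) := by
      rw [List.filterMap_append]
      by_cases h1 : (pvCell b c.1 c.2 == some pt) = true
      · rw [if_pos h1, if_neg hnotin]
        by_cases h2 : (find_liberty c.1 c.2 b == 0) = true
        · rw [if_pos h2]
          simp only [pvFA, List.filterMap_cons]
          rw [if_pos (by simp [h1, h2])]
          simp
        · rw [if_neg h2]
          simp only [pvFA, List.filterMap_cons]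
          rw [if_neg (by simp [h2])]
          simp
      · rw [if_neg h1]
        simp only [pvFA, List.filterMap_cons]
        rw [if_neg (by simp [h1])]
        simp
    rw [hstep]
    have hfresh' : ∀ p ∈ L, p ∉ P ++ [c] := by
      intro p hp
      rw [List.mem_append]
      rintro (h | h)
      · exact hfresh p (by simp [hp]) h
      · simp at h; subst h
        exact (List.nodup_cons.1 hnd).1 hp
    have := ih (P ++ [c]) (List.nodup_cons.1 hnd).2 hfresh'
    rw [this, List.append_assoc]
    rfl

lemma A_shape (b : List (List Int)) (pt : Int) :
    captured_stones pt b = pvScan.filterMap (pvFA b pt) := by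
  have h := A_fold b pt pvScan [] nodup_pvScan (by simp)
  simp only [List.filterMap_nil, List.nil_append] at h
  rw [pvScan, List.foldl_flatMap] at h
  simp only [List.foldl_map] at h
  rw [captured_stones]
  exact h

-- ---- B side: the outer scan ----
def pvOuterInv (b : List (List Int)) (pt : Int) (P : List (Int × Int))
    (vis dead : List (Int × Int)) : Prop :=
  vis.Nodup ∧ (∀ c ∈ vis, pvInBox (b.length : Int) c) ∧
  (∀ c, c ∈ vis ↔ ∃ s ∈ P, pvCell b s.1 s.2 = some pt ∧ pvReach b s c) ∧
  (∀ c, c ∈ dead ↔ ∃ s ∈ P, pvCell b s.1 s.2 = some pt ∧ pvDead b s ∧ pvReach b s c)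

lemma B_fold (b : List (List Int)) (pt : Int) :
    ∀ (L P : List (Int × Int)) (vis dead : PySem.Set (Int × Int)),
    (∀ p ∈ L, pvInBox (b.length : Int) p) → pvOuterInv b pt P vis dead →
    pvOuterInv b pt (P ++ L)
      (L.foldl (fun (vd : PySem.Set (Int × Int) × PySem.Set (Int × Int)) c =>
        if ¬ (pvCell b c.1 c.2 == some pt) ∨ c ∈ vd.1 then vd
        else
          let r := pv_bfs_loop b pt (b.length : Int) [c] [c] (PySem.Set.add vd.1 c) false
          if r.2.2 = false then (r.2.1, PySem.Set.update vd.2 r.1) else (r.2.1, vd.2)) (vis, dead)).1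
      (L.foldl (fun (vd : PySem.Set (Int × Int) × PySem.Set (Int × Int)) c =>
        if ¬ (pvCell b c.1 c.2 == some pt) ∨ c ∈ vd.1 then vd
        else
          let r := pv_bfs_loop b pt (b.length : Int) [c] [c] (PySem.Set.add vd.1 c) false
          if r.2.2 = false then (r.2.1, PySem.Set.update vd.2 r.1) else (r.2.1, vd.2)) (vis, dead)).2 := by
  intro L
  induction L with
  | nil => intro P vis dead _ hInv; simpa using hInv
  | cons c L ih =>
    intro P vis dead hLbox hInv
    obtain ⟨hnd, hbox, hvis, hdead⟩ := hInv
    have hcbox : pvInBox (b.length : Int) c := hLbox c (by simp)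
    have hsbox' : ∀ s' ∈ P, pvCell b s'.1 s'.2 = some pt → pvInBox (b.length : Int) s' := by
      intro s' hs' hc'
      exact hbox s' ((hvis s').2 ⟨s', hs', hc', .refl⟩)
    rw [List.foldl_cons]
    by_cases hskip : (¬ (pvCell b c.1 c.2 == some pt) ∨ c ∈ (vis, dead).1)
    · rw [if_pos hskip]
      have hInv' : pvOuterInv b pt (P ++ [c]) vis dead := by
        refine ⟨hnd, hbox, ?_, ?_⟩
        · intro x
          rw [hvis x]
          constructor
          · rintro ⟨s', hs', hc', hr⟩
            exact ⟨s', List.mem_append_left _ hs', hc', hr⟩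
          · rintro ⟨s', hs', hc', hr⟩
            rcases List.mem_append.1 hs' with h | h
            · exact ⟨s', h, hc', hr⟩
            · simp at h; subst h
              rcases hskip with hno | hin
              · exact absurd hc' (by simpa using hno)
              · obtain ⟨t, ht, htc, htr⟩ := (hvis s').1 hin
                exact ⟨t, ht, htc, reach_trans htr hr⟩
        · intro x
          rw [hdead x]
          constructor
          · rintro ⟨s', hs', hc', hd', hr⟩
            exact ⟨s', List.mem_append_left _ hs', hc', hd', hr⟩
          · rintro ⟨s', hs', hc', hd', hr⟩
            rcases List.mem_append.1 hs' with h | h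
            · exact ⟨s', h, hc', hd', hr⟩
            · simp at h; subst h
              rcases hskip with hno | hin
              · exact absurd hc' (by simpa using hno)
              · obtain ⟨t, ht, htc, htr⟩ := (hvis s').1 hin
                refine ⟨t, ht, htc, ?_, reach_trans htr hr⟩
                exact (dead_transport (hsbox' t ht htc) htr).2 hd'
      have := ih (P ++ [c]) vis dead (fun p hp => hLbox p (by simp [hp])) hInv'
      rwa [List.append_assoc] at this
    · rw [if_neg hskip]
      have hcc : pvCell b c.1 c.2 = some pt := by
        rcases not_or.1 hskip with ⟨h, _⟩
        simpa using not_not.1 h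
      have hcv : c ∉ vis := (not_or.1 hskip).2
      have hV0 : ∀ x ∈ vis, ¬ pvReach b c x := by
        intro x hx hr
        obtain ⟨t, ht, htc, htr⟩ := (hvis x).1 hx
        have : pvReach b t c := reach_trans htr (reach_symm hcbox hr)
        exact hcv ((hvis c).2 ⟨t, ht, htc, this⟩)
      obtain ⟨r1, r2, r3, r4, r5⟩ := bfsB_seed b pt c hcbox hcc vis hnd hbox hcv hV0
      set r := pv_bfs_loop b pt (b.length : Int) [c] [c] (PySem.Set.add vis c) false with hr
      have hvis' : ∀ x, x ∈ r.2.1 ↔ ∃ s' ∈ P ++ [c], pvCell b s'.1 s'.2 = some pt ∧ pvReach b s' x := by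
        intro x
        rw [r2 x]
        constructor
        · rintro (h | h)
          · obtain ⟨t, ht, htc, htr⟩ := (hvis x).1 h
            exact ⟨t, List.mem_append_left _ ht, htc, htr⟩
          · exact ⟨c, List.mem_append_right _ (by simp), hcc, h⟩
        · rintro ⟨s', hs', hc', hr'⟩
          rcases List.mem_append.1 hs' with h | h
          · exact Or.inl ((hvis x).2 ⟨s', h, hc', hr'⟩)
          · simp at h; subst h
            exact Or.inr hr'
      by_cases hlib : r.2.2 = false
      · rw [if_pos hlib]
        have hdc : pvDead b c := by
          intro x hx hl
          have : r.2.2 = true := r3.2 ⟨x, hx, hl⟩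
          rw [hlib] at this; cases this
        have hInv' : pvOuterInv b pt (P ++ [c]) r.2.1 (PySem.Set.update dead r.1) := by
          refine ⟨r4, r5, hvis', ?_⟩
          intro x
          rw [PySem.Set.mem_update, hdead x]
          constructor
          · rintro (⟨s', hs', hc', hd', hr'⟩ | h)
            · exact ⟨s', List.mem_append_left _ hs', hc', hd', hr'⟩
            · exact ⟨c, List.mem_append_right _ (by simp), hcc, hdc, (r1 x).1 h⟩
          · rintro ⟨s', hs', hc', hd', hr'⟩
            rcases List.mem_append.1 hs' with h | h
            · exact Or.inl ⟨s', h, hc', hd', hr'⟩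
            · simp at h; subst h
              exact Or.inr ((r1 x).2 hr')
        have := ih (P ++ [c]) r.2.1 (PySem.Set.update dead r.1)
          (fun p hp => hLbox p (by simp [hp])) hInv'
        rwa [List.append_assoc] at this
      · rw [if_neg hlib]
        have hndc : ¬ pvDead b c := by
          intro hd
          have : r.2.2 = true := by
            cases hb : r.2.2 with
            | false => exact absurd hb hlib
            | true => rfl
          obtain ⟨x, hx, hl⟩ := r3.1 this
          exact hd x hx hl
        have hInv' : pvOuterInv b pt (P ++ [c]) r.2.1 dead := by
          refine ⟨r4, r5, hvis', ?_⟩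
          intro x
          rw [hdead x]
          constructor
          · rintro ⟨s', hs', hc', hd', hr'⟩
            exact ⟨s', List.mem_append_left _ hs', hc', hd', hr'⟩
          · rintro ⟨s', hs', hc', hd', hr'⟩
            rcases List.mem_append.1 hs' with h | h
            · exact ⟨s', h, hc', hd', hr'⟩
            · simp at h; subst h
              exact absurd hd' hndc
        have := ih (P ++ [c]) r.2.1 dead (fun p hp => hLbox p (by simp [hp])) hInv'
        rwa [List.append_assoc] at this

lemma pv_filter_map_eq (r : List Int) (p : Int → Bool) (f : Int → List Int) :
    (r.filter p).map f = r.filterMap (fun x => if p x then some (f x) else none) := by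
  induction r with
  | nil => rfl
  | cons a l ih => by_cases h : p a <;> simp [h, ih]

lemma pv_emit (dead : List (Int × Int)) :
    (PySem.List.pyRange 0 5 1).flatMap (fun i =>
      ((PySem.List.pyRange 0 5 1).filter (fun j => (i, j) ∈ dead)).map (fun j => [i, j])) =
    pvScan.filterMap (fun c => if c ∈ dead then some [c.1, c.2] else none) := by
  rw [pvScan, List.filterMap_flatMap]
  congr 1
  funext i
  rw [List.filterMap_map, pv_filter_map_eq]
  apply List.filterMap_congr
  intro j _
  simp [Function.comp]

set_option maxHeartbeats 1000000 in
lemma B_shape (b : List (List Int)) (pt : Int) (hn : 5 ≤ (b.length : Int)) :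
    captured_stones_alt pt b = pvScan.filterMap (pvFA b pt) := by
  have hboxScan : ∀ p ∈ pvScan, pvInBox (b.length : Int) p := by
    intro p hp
    obtain ⟨a1, a2, a3, a4⟩ := mem_pvScan.1 hp
    exact ⟨a1, by omega, a3, by omega⟩
  have hInv := B_fold b pt pvScan [] PySem.Set.empty PySem.Set.empty hboxScan
    (by refine ⟨by simp [PySem.Set.empty], by simp [PySem.Set.empty], ?_, ?_⟩ <;>
      intro x <;> simp [PySem.Set.empty])
  rw [pvScan, List.foldl_flatMap] at hInv
  simp only [List.foldl_map, List.nil_append] at hInv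
  rw [captured_stones_alt]
  simp only []
  rw [pv_emit]
  apply List.filterMap_congr
  intro c hc
  have hbox := hboxScan c hc
  have hdead : ∀ x ∈ pvScan, (x ∈ ((PySem.List.pyRange 0 5 1).foldl
      (fun (acc : PySem.Set (Int × Int) × PySem.Set (Int × Int)) i =>
        (PySem.List.pyRange 0 5 1).foldl (fun (vd : PySem.Set (Int × Int) × PySem.Set (Int × Int)) j =>
          if ¬ (pvCell b i j == some pt) ∨ (i, j) ∈ vd.1 then vd
          else
            let r := pv_bfs_loop b pt (b.length : Int) [(i, j)] [(i, j)] (PySem.Set.add vd.1 (i, j)) false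
            if r.2.2 = false then (r.2.1, PySem.Set.update vd.2 r.1) else (r.2.1, vd.2)) acc)
      (PySem.Set.empty, PySem.Set.empty)).2 ↔
      (pvCell b x.1 x.2 = some pt ∧ pvDead b x)) := by
    intro x hx
    have hmem := hInv.2.2.2 x
    rw [hmem]
    constructor
    · rintro ⟨s', hs', hc', hd', hr'⟩
      exact ⟨(reach_color hr').trans hc', (dead_transport (hboxScan s' hs') hr').1 hd'⟩
    · rintro ⟨hcell, hdc⟩
      exact ⟨x, hx, hcell, hdc, .refl⟩
  by_cases hd : c ∈ ((PySem.List.pyRange 0 5 1).foldl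
      (fun (acc : PySem.Set (Int × Int) × PySem.Set (Int × Int)) i =>
        (PySem.List.pyRange 0 5 1).foldl (fun (vd : PySem.Set (Int × Int) × PySem.Set (Int × Int)) j =>
          if ¬ (pvCell b i j == some pt) ∨ (i, j) ∈ vd.1 then vd
          else
            let r := pv_bfs_loop b pt (b.length : Int) [(i, j)] [(i, j)] (PySem.Set.add vd.1 (i, j)) false
            if r.2.2 = false then (r.2.1, PySem.Set.update vd.2 r.1) else (r.2.1, vd.2)) acc)
      (PySem.Set.empty, PySem.Set.empty)).2
  · obtain ⟨hcell, hdc⟩ := (hdead c hc).1 hd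
    have hfl : find_liberty c.1 c.2 b = 0 := (find_liberty_zero_iff hbox).2 hdc
    rw [if_pos hd]
    simp [pvFA, hcell, hfl]
  · rw [if_neg hd]
    simp only [pvFA]
    rw [if_neg ?_]
    intro h
    simp only [Bool.and_eq_true, beq_iff_eq] at h
    exact hd ((hdead c hc).2 ⟨h.1, (find_liberty_zero_iff hbox).1 h.2⟩)

-- ===== VERDICT (by name: the statement is the Claim_ definition above) =====
theorem captured_stones_spec : Claim_equal_captured_stones := by
  intro piece_type currBoard _ hpre
  unfold Spec_captured_stones
  exact (A_shape currBoard piece_type).trans (B_shape currBoard piece_type hpre.1).symm
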